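-- pv_equiv track=rewrite | github.com/claratejido/Rosalind-challenges | challenge_5_Clara_Tejido.py | get_circular_seq
-- ===== SOURCE A (Python) =====
-- def get_circular_seq(circular_seq, sequences, k):
-- #loop over the list of sequences until the end of the dictionary
--     while sequences:
--         # check if all but the first nucleotide of the sequence 1 is equal to all but the last nucleotide for each of the other sequences in the dictionary (sequence 2)
--         for key in sequences:
--             if (circular_seq[len(circular_seq)-k:] == sequences[key][:k]):
--             # if True: append the last nucleotide of the sequence 2 to the circular string and remove the sequence 1 from the dictionary
--                 circular_seq += sequences[key][-1:]
--                 del sequences[key]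
--                 break
--     # I realise that the first sequence in the circular string was being repeated at the end, so I remove the last 49 nucelotides to make the shortest circular string
--     if circular_seq[:k] == circular_seq[len(circular_seq)-k:]:
--         circular_seq = circular_seq[:len(circular_seq)-k]
--     return circular_seq
-- ===== SOURCE B (Python) =====
-- def get_circular_seq(circular_seq, sequences, k):
--     # Index the sequences once by their k-prefix into insertion-ordered queues;
--     # each step pops the earliest unused sequence whose k-prefix equals the
--     # current k-suffix (one O(1) bucket lookup instead of rescanning the dict).
--     # Does not mutate `sequences`; stops (instead of looping forever like A)
--     # when no remaining sequence extends the current suffix.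
--     buckets = {}
--     for seq in sequences.values():
--         buckets.setdefault(seq[:k], []).append(seq)
--     heads = dict.fromkeys(buckets, 0)
--     remaining = len(sequences)
--     cur = circular_seq
--     while remaining:
--         sfx = cur[len(cur)-k:]
--         queue = buckets.get(sfx)
--         if queue is None or heads[sfx] >= len(queue):
--             break  # no remaining sequence overlaps; A would loop forever here
--         cur += queue[heads[sfx]][-1:]
--         heads[sfx] += 1
--         remaining -= 1
--     if cur[:k] == cur[len(cur)-k:]:
--         cur = cur[:len(cur)-k]
--     return cur
-- ===== Notes on version B (the rewrite author's own statement) =====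
-- stated objective: alternative
-- what changed: B builds a one-pass index from each sequence's k-prefix to an insertion-ordered queue with a per-queue cursor, so each join step is one O(1) bucket lookup instead of A's rescan of the whole remaining dict; B does not mutate the sequences dict and stops instead of looping forever when no overlap exists.
-- outside the precondition, e.g. on get_circular_seq('ab', {'s1': 'bb', 's2': 'ba'}, 1): A returns 'abb', B returns 'abb'; on get_circular_seq('a', {'s1': 'a'}, 2): A returns '', B returns ''
import Mathlib
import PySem

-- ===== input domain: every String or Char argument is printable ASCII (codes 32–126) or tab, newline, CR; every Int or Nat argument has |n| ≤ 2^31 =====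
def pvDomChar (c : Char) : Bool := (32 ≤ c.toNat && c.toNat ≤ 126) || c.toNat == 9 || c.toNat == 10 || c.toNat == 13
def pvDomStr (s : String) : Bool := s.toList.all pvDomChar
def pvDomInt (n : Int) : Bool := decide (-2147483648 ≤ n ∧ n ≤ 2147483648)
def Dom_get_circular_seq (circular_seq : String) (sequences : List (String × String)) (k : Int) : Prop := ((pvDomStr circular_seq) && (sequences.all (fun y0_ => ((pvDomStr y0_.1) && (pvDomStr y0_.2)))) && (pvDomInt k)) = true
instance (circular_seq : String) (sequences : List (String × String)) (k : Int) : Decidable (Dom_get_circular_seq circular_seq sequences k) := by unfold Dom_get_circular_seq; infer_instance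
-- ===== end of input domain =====

-- B replaces A's repeated rescan of the whole dict with a one-pass index from k-prefix to an
-- insertion-ordered queue with a per-queue cursor (one O(1) bucket lookup per joined sequence).
-- Python A mutates `sequences` in place (del); B does not — the equivalence proved here is
-- about the RETURN value only.

-- shared slice abbreviations: s[len(s)-k:], s[:k], s[-1:]
def pvLastK (k : Int) (s : String) : String :=
  PySem.Str.slice s (some (PySem.Str.len s - k)) none
def pvPrefK (k : Int) (s : String) : String :=
  PySem.Str.slice s none (some k)
def pvLast1 (s : String) : String :=
  PySem.Str.slice s (some (-1)) none

-- ===== PORT A =====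
-- the `while sequences:` / `for key in sequences:` greedy loop of A; the `none` branch covers
-- both the empty dict (while exits) and 'no key matches', where the Python loops forever —
-- on inputs satisfying Pre_ that second reading is never reached.
def pvALoop (k : Int) (circ : String) (d : PySem.Dict String String) : String :=
  let m := d.keys.find? (fun key => pvLastK k circ == pvPrefK k (d.getD key ""))
  if hm : m.isSome then
    let key := m.get hm
    pvALoop k (circ ++ pvLast1 (d.getD key "")) (d.erase key)
  else circ
termination_by d.items.length
decreasing_by
  have h1 : m = some (m.get hm) := (Option.some_get hm).symm
  have h2 : m.get hm ∈ d.keys := List.mem_of_find?_eq_some h1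
  rcases List.mem_map.1 h2 with ⟨q, hq, hq1⟩
  simp only [PySem.Dict.erase]
  refine List.length_filter_lt_length_iff_exists.2 ⟨q, hq, ?_⟩
  rw [hq1]
  exact (by simp : ¬(!((m.get hm) == (m.get hm))) = true)

def get_circular_seq (circular_seq : String) (sequences : List (String × String)) (k : Int) : String :=
  let res := pvALoop k circular_seq ⟨sequences⟩
  if (pvPrefK k res == pvLastK k res) then
    PySem.Str.slice res none (some (PySem.Str.len res - k))
  else res

-- ===== PORT B =====
-- Source B's `while remaining:` loop, fuel = remaining; the two `break` readings are the
-- `none` bucket and the exhausted-cursor check; queue[heads[sfx]] is in range whenever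
-- reached, so `(pyGet? …).getD ""` is exact.
def pvBLoop (k : Int) (buckets : PySem.Dict String (List String)) :
    Nat → String → PySem.Dict String Int → String
  | 0, cur, _ => cur
  | n + 1, cur, heads =>
    let sfx := pvLastK k cur
    match buckets.get? sfx with
    | none => cur
    | some queue =>
      let i := heads.getD sfx 0
      if (queue.length : Int) ≤ i then cur
      else pvBLoop k buckets n (cur ++ pvLast1 ((PySem.List.pyGet? queue i).getD ""))
             (heads.insert sfx (i + 1))

def get_circular_seq_alt (circular_seq : String) (sequences : List (String × String)) (k : Int) : String :=
  let buckets : PySem.Dict String (List String) :=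
    sequences.foldl (fun b p => b.modify (pvPrefK k p.2) [] (· ++ [p.2])) ⟨[]⟩
  let heads0 : PySem.Dict String Int :=
    buckets.keys.foldl (fun h key => h.insert key 0) ⟨[]⟩
  let cur := pvBLoop k buckets sequences.length circular_seq heads0
  if (pvPrefK k cur == pvLastK k cur) then
    PySem.Str.slice cur none (some (PySem.Str.len cur - k))
  else cur

-- ===== PRECONDITION & SPEC =====
-- `some ordering of the values chains the seed's k-suffix around`: v₁'s k-prefix is the
-- seed's k-suffix and each next value's k-prefix is the k-suffix reached so far.
def pvChainB (k : Int) : String → List String → Bool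
  | _, [] => true
  | s, v :: rest => (pvPrefK k v == s) && pvChainB k (pvLastK k (s ++ pvLast1 v)) rest

-- Pre_ excludes duplicate keys (a Python dict cannot contain them) and the inputs on which
-- A's while-loop never terminates: A loops forever as soon as one full pass finds no
-- k-overlap, and since termination of the greedy loop is not a closed-form property of the
-- input, Pre_ admits the closed-form families where every pass provably matches — the empty
-- dict, k ≤ 0 with every value of length ≤ -k (both compared slices are then ''), and the
-- problem's intended instances: k ≥ 1 ≤ len(seed), pairwise-distinct k-prefixes, and some
-- ordering of the values chaining the seed's k-suffix around.
def Pre_get_circular_seq (circular_seq : String) (sequences : List (String × String)) (k : Int) : Prop :=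
  (sequences.map Prod.fst).Nodup ∧
  (sequences = [] ∨
   (k ≤ 0 ∧ ∀ p ∈ sequences, k = 0 ∨ PySem.Str.len p.2 ≤ -k) ∨
   (1 ≤ k ∧ k ≤ PySem.Str.len circular_seq ∧
    (sequences.map (fun p => pvPrefK k p.2)).Nodup ∧
    (sequences.map Prod.snd).permutations.any
      (fun l => pvChainB k (pvLastK k circular_seq) l) = true))
instance (circular_seq : String) (sequences : List (String × String)) (k : Int) : Decidable (Pre_get_circular_seq circular_seq sequences k) := by unfold Pre_get_circular_seq; infer_instance

def pvWitness_get_circular_seq : String × (List (String × String)) × Int :=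
  ("abc", [("s1", "bcd"), ("s2", "cda")], 2)

def Spec_get_circular_seq (circular_seq : String) (sequences : List (String × String)) (k : Int) (out : String) : Prop := out = get_circular_seq_alt circular_seq sequences k
instance (circular_seq : String) (sequences : List (String × String)) (k : Int) (out : String) : Decidable (Spec_get_circular_seq circular_seq sequences k out) := by unfold Spec_get_circular_seq; infer_instance

-- ===== CLAIM (what is proved, stated in full; the proofs are below) =====
def Claim_equal_get_circular_seq : Prop := ∀ (circular_seq : String) (sequences : List (String × String)) (k : Int), Dom_get_circular_seq circular_seq sequences k → Pre_get_circular_seq circular_seq sequences k → Spec_get_circular_seq circular_seq sequences k (get_circular_seq circular_seq sequences k)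

-- ===== LEMMAS AND PROOFS =====

-- the common normal form both loops reach: append the last character of each value in order
def pvLasts (cur : String) (vs : List String) : String :=
  vs.foldl (fun c v => c ++ pvLast1 v) cur

lemma pvStrLen (s : String) : PySem.Str.len s = (s.toList.length : Int) := by
  simp [PySem.Str.len]

-- s[len(s)-k:] is '' for k ≤ 0
lemma pvSuffix_empty (k : Int) (hk : k ≤ 0) (s : String) : pvLastK k s = "" := by
  have h0 : (0:Int) ≤ PySem.Str.len s - k := by simp only [pvStrLen]; omega
  have hle : s.toList.length ≤ (PySem.Str.len s - k).toNat := by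
    simp only [pvStrLen]; omega
  apply String.toList_inj.mp
  rw [pvLastK, PySem.Str.toList_slice, PySem.Chars.slice_eq_listSlice,
    PySem.List.slice_from _ h0, List.drop_eq_nil_of_le hle]
  rfl

-- s[:k] is '' for k ≤ 0 when k = 0 or len(s) ≤ -k
lemma pvPrefix_empty (k : Int) (hk : k ≤ 0) (s : String)
    (h : k = 0 ∨ PySem.Str.len s ≤ -k) : pvPrefK k s = "" := by
  apply String.toList_inj.mp
  rcases eq_or_lt_of_le hk with h0 | hneg
  · rw [pvPrefK, h0, PySem.Str.toList_slice, PySem.Chars.slice_eq_listSlice,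
      PySem.List.slice_to _ (le_refl (0:Int))]
    simp
  · have hlen : PySem.Str.len s ≤ -k := by
      rcases h with h0 | h1
      · omega
      · exact h1
    have hk' : 0 < (-k).toNat := by omega
    have hkeq : k = -(((-k).toNat : Nat) : Int) := by omega
    rw [pvPrefK, hkeq, PySem.Str.toList_slice, PySem.Chars.slice_eq_listSlice,
      PySem.List.slice_to_neg_natCast _ _ hk']
    have hz : s.toList.length - (-k).toNat = 0 := by
      simp only [pvStrLen] at hlen; omega
    rw [hz, List.take_zero]
    simp

lemma pvLastK_toList (k : Int) (s : String) (h : (0:Int) ≤ PySem.Str.len s - k) :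
    (pvLastK k s).toList = s.toList.drop (PySem.Str.len s - k).toNat := by
  rw [pvLastK, PySem.Str.toList_slice, PySem.Chars.slice_eq_listSlice,
    PySem.List.slice_from _ h]

lemma pvLastK_length (k : Int) (s : String) (hk0 : 0 ≤ k)
    (h : k ≤ PySem.Str.len s) : (pvLastK k s).toList.length = k.toNat := by
  rw [pvLastK_toList k s (by omega)]
  have := pvStrLen s
  simp only [List.length_drop]
  omega

lemma pvLast1_toList (s : String) :
    (pvLast1 s).toList = s.toList.drop (s.toList.length - 1) := by
  rw [pvLast1, PySem.Str.toList_slice, PySem.Chars.slice_eq_listSlice,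
    PySem.List.slice_from_neg_one]

lemma pvLast1_length (s : String) (h : s.toList.length ≠ 0) :
    (pvLast1 s).toList.length = 1 := by
  rw [pvLast1_toList]
  simp only [List.length_drop]
  omega

-- appending one character shifts the k-suffix: only the previous k-suffix matters
lemma pvLastK_append1 (k : Int) (s t : String) (hk1 : 1 ≤ k)
    (hs : k ≤ PySem.Str.len s) (ht : t.toList.length = 1) :
    pvLastK k (s ++ t) = pvLastK k (pvLastK k s ++ t) := by
  have hls := pvStrLen s
  have hlst : (s ++ t).toList = s.toList ++ t.toList := by
    rw [String.toList_append]
  have hlenst : PySem.Str.len (s ++ t) = (s.toList.length : Int) + 1 := by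
    rw [pvStrLen, hlst, List.length_append, ht]
    push_cast
    ring
  have hinner : (pvLastK k s).toList = s.toList.drop (PySem.Str.len s - k).toNat :=
    pvLastK_toList k s (by omega)
  have hinlen : (pvLastK k s).toList.length = k.toNat := pvLastK_length k s (by omega) hs
  have hlenit : PySem.Str.len (pvLastK k s ++ t) = (k.toNat : Int) + 1 := by
    rw [pvStrLen, String.toList_append, List.length_append, hinlen, ht]
    push_cast
    ring
  apply String.toList_inj.mp
  rw [pvLastK_toList k (s ++ t) (by omega), pvLastK_toList k (pvLastK k s ++ t) (by omega),
    hlst, String.toList_append, hinner]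
  have e1 : (PySem.Str.len (s ++ t) - k).toNat = (s.toList.length + 1) - k.toNat := by omega
  have e2 : (PySem.Str.len (pvLastK k s ++ t) - k).toNat = 1 := by omega
  rw [e1, e2]
  rw [List.drop_append_of_le_length (by omega),
    List.drop_append_of_le_length (by rw [List.length_drop]; omega)]
  rw [List.drop_drop]
  have e3 : ((PySem.Str.len s - k).toNat) + 1 = s.toList.length + 1 - k.toNat := by omega
  rw [e3]

-- chain destructuring
lemma pvChain_cons (k : Int) (s v : String) (rest : List String)
    (h : pvChainB k s (v :: rest) = true) :
    pvPrefK k v = s ∧ pvChainB k (pvLastK k (s ++ pvLast1 v)) rest = true := by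
  simpa [pvChainB, Bool.and_eq_true, beq_iff_eq] using h

-- a value whose k-prefix has length k ≥ 1 is nonempty, so its last-1 slice has length 1
lemma pvChain_val_last1 (k : Int) (cur v : String) (hk1 : 1 ≤ k)
    (hc : k ≤ PySem.Str.len cur) (hp : pvPrefK k v = pvLastK k cur) :
    (pvLast1 v).toList.length = 1 := by
  have hlk : (pvLastK k cur).toList.length = k.toNat := pvLastK_length k cur (by omega) hc
  have hpl : (pvPrefK k v).toList = v.toList.take k.toNat := by
    rw [pvPrefK, PySem.Str.toList_slice, PySem.Chars.slice_eq_listSlice,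
      PySem.List.slice_to _ (by omega : (0:Int) ≤ k)]
  have : (v.toList.take k.toNat).length = k.toNat := by
    rw [← hpl, hp, hlk]
  have hvlen : v.toList.length ≠ 0 := by
    simp only [List.length_take] at this
    omega
  exact pvLast1_length v hvlen

-- find? only looks at the predicate's values on members
lemma pvFind?_congr {α : Type} (l : List α) (p q : α → Bool)
    (h : ∀ x ∈ l, p x = q x) : l.find? p = l.find? q := by
  induction l with
  | nil => rfl
  | cons a as ih =>
      rw [List.find?_cons, List.find?_cons, h a (by simp)]
      cases q a
      · exact ih (fun x hx => h x (by simp [hx]))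
      · rfl

lemma pvGetD_cons_self (e : String × String) (es : List (String × String)) :
    (PySem.Dict.mk (e :: es)).getD e.1 "" = e.2 := by
  simp [PySem.Dict.getD, PySem.Dict.get?, List.find?_cons_of_pos]

lemma pvGetD_cons_ne (e : String × String) (es : List (String × String))
    (key : String) (h : ¬ (key = e.1)) :
    (PySem.Dict.mk (e :: es)).getD key "" = (PySem.Dict.mk es).getD key "" := by
  simp [PySem.Dict.getD, PySem.Dict.get?, Ne.symm h]

lemma pvGetD_of_mem (entries : List (String × String)) (kv v : String)
    (hnd : (entries.map Prod.fst).Nodup) (hmem : (kv, v) ∈ entries) :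
    (PySem.Dict.mk entries).getD kv "" = v := by
  induction entries with
  | nil => cases hmem
  | cons e es ih =>
      rcases List.mem_cons.1 hmem with heq | htail
      · rw [← heq] at hnd ⊢
        exact pvGetD_cons_self (kv, v) es
      · have hne : kv ≠ e.1 := by
          intro hcontra
          have : kv ∈ es.map Prod.fst := List.mem_map.2 ⟨(kv, v), htail, rfl⟩
          rw [hcontra] at this
          exact (List.nodup_cons.1 hnd).1 this
        rw [pvGetD_cons_ne e es kv hne]
        exact ih (List.nodup_cons.1 hnd).2 htail

-- greedy match: with pairwise-distinct k-prefixes the scan finds exactly the chain's entry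
lemma pvFind_dict (k : Int) (target : String) :
    ∀ (entries : List (String × String)) (kv v : String),
      (entries.map Prod.fst).Nodup →
      (entries.map (fun p => pvPrefK k p.2)).Nodup →
      (kv, v) ∈ entries → pvPrefK k v = target →
      ((PySem.Dict.mk entries).keys.find?
        (fun key => target == pvPrefK k ((PySem.Dict.mk entries).getD key ""))) = some kv := by
  intro entries
  induction entries with
  | nil => intro kv v _ _ hmem _; cases hmem
  | cons e es ih =>
      intro kv v hnd hpnd hmem hpref
      have hkeys : (PySem.Dict.mk (e :: es)).keys = e.1 :: (PySem.Dict.mk es).keys := by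
        simp [PySem.Dict.keys]
      rw [hkeys, List.find?_cons]
      rcases List.mem_cons.1 hmem with heq | htail
      · have he : e = (kv, v) := heq.symm
        subst he
        have hpredt : (target == pvPrefK k ((PySem.Dict.mk ((kv, v) :: es)).getD kv "")) = true := by
          rw [pvGetD_cons_self (kv, v) es]
          simp [hpref]
        rw [hpredt]
      · -- the match sits in the tail; the head's prefix differs
        have hvmem : pvPrefK k v ∈ es.map (fun p => pvPrefK k p.2) :=
          List.mem_map.2 ⟨(kv, v), htail, rfl⟩
        have hheadne : ¬ (pvPrefK k e.2 = target) := by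
          intro hcontra
          rw [← hpref] at hcontra
          rw [← hcontra] at hvmem
          exact (List.nodup_cons.1 hpnd).1 hvmem
        have hpredf : (target == pvPrefK k ((PySem.Dict.mk (e :: es)).getD e.1 "")) = false := by
          rw [pvGetD_cons_self e es]
          simp only [beq_eq_false_iff_ne, ne_eq]
          exact fun h => hheadne h.symm
        rw [hpredf]
        have hcongr :
            (PySem.Dict.mk es).keys.find?
              (fun key => target == pvPrefK k ((PySem.Dict.mk (e :: es)).getD key "")) =
            (PySem.Dict.mk es).keys.find?
              (fun key => target == pvPrefK k ((PySem.Dict.mk es).getD key "")) := by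
          apply pvFind?_congr
          intro key hkey
          have hkne : key ≠ e.1 := by
            intro hcontra
            have : key ∈ es.map Prod.fst := by simpa [PySem.Dict.keys] using hkey
            rw [hcontra] at this
            exact (List.nodup_cons.1 hnd).1 this
          rw [pvGetD_cons_ne e es key hkne]
        rw [hcongr]
        exact ih kv v (List.nodup_cons.1 hnd).2 (List.nodup_cons.1 hpnd).2 htail hpref

-- erasing the matched key removes exactly its value from the value list
lemma pvErase_perm :
    ∀ (entries : List (String × String)) (kv v : String),
      (entries.map Prod.fst).Nodup → (kv, v) ∈ entries →
      (v :: (entries.filter (fun q => !(q.1 == kv))).map Prod.snd).Perm (entries.map Prod.snd) := by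
  intro entries
  induction entries with
  | nil => intro kv v _ hmem; cases hmem
  | cons e es ih =>
      intro kv v hnd hmem
      rcases List.mem_cons.1 hmem with heq | htail
      · have he : e = (kv, v) := heq.symm
        subst he
        have hnotin : kv ∉ es.map Prod.fst := (List.nodup_cons.1 hnd).1
        have hhead : (!((kv, v).1 == kv)) = false := by simp
        rw [List.filter_cons, hhead]
        simp only [Bool.false_eq_true, if_false]
        have hes : es.filter (fun q => !(q.1 == kv)) = es := by
          apply List.filter_eq_self.2
          intro q hq
          have : q.1 ≠ kv := by
            intro hcontra
            exact hnotin (hcontra ▸ List.mem_map.2 ⟨q, hq, rfl⟩)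
          simp [this]
        rw [hes]
        rfl
      · have hne : (!(e.1 == kv)) = true := by
          have : kv ≠ e.1 := by
            intro hcontra
            have : kv ∈ es.map Prod.fst := List.mem_map.2 ⟨(kv, v), htail, rfl⟩
            rw [hcontra] at this
            exact (List.nodup_cons.1 hnd).1 this
          simp [this.symm]
        rw [List.filter_cons, hne]
        simp only [if_true, List.map_cons]
        exact (List.Perm.swap e.2 v _).trans
          ((ih kv v (List.nodup_cons.1 hnd).2 htail).cons e.2)

-- A's loop follows the chain: it appends the chain values' last characters in order
lemma pvALoop_chain (k : Int) (hk1 : 1 ≤ k) :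
    ∀ (l : List String) (entries : List (String × String)) (cur : String),
      (entries.map Prod.fst).Nodup →
      (entries.map (fun p => pvPrefK k p.2)).Nodup →
      (entries.map Prod.snd).Perm l →
      pvChainB k (pvLastK k cur) l = true →
      k ≤ PySem.Str.len cur →
      pvALoop k cur ⟨entries⟩ = pvLasts cur l := by
  intro l
  induction l with
  | nil =>
      intro entries cur _ _ hperm _ _
      have : entries = [] := by
        have := hperm.eq_nil
        cases entries with
        | nil => rfl
        | cons e es => simp at this
      subst this
      rw [pvALoop.eq_def]
      simp [PySem.Dict.keys, pvLasts]
  | cons v rest ih =>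
      intro entries cur hnd hpnd hperm hchain hklen
      obtain ⟨hpref, hchain'⟩ := pvChain_cons k _ v rest hchain
      have hvmem : v ∈ entries.map Prod.snd := hperm.mem_iff.2 (by simp)
      obtain ⟨q, hqmem, hqv⟩ := List.mem_map.1 hvmem
      have hmem' : (q.1, v) ∈ entries := by
        rw [← hqv]
        simpa using hqmem
      have hfind := pvFind_dict k (pvLastK k cur) entries q.1 v hnd hpnd hmem' hpref
      rw [pvALoop.eq_def]
      simp only [hfind, Option.isSome_some, dite_true, Option.get_some]
      rw [pvGetD_of_mem entries q.1 v hnd hmem']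
      have herase : (PySem.Dict.mk entries).erase q.1
          = PySem.Dict.mk (entries.filter (fun p => !(p.1 == q.1))) := rfl
      rw [herase]
      have hfsub : (entries.filter (fun p => !(p.1 == q.1))).Sublist entries :=
        List.filter_sublist
      have hnd' : ((entries.filter (fun p => !(p.1 == q.1))).map Prod.fst).Nodup :=
        hnd.sublist (hfsub.map Prod.fst)
      have hpnd' : ((entries.filter (fun p => !(p.1 == q.1))).map (fun p => pvPrefK k p.2)).Nodup :=
        hpnd.sublist (hfsub.map _)
      have hperm' : ((entries.filter (fun p => !(p.1 == q.1))).map Prod.snd).Perm rest :=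
        (((pvErase_perm entries q.1 v hnd hmem').trans hperm).cons_inv)
      have hlast1 : (pvLast1 v).toList.length = 1 :=
        pvChain_val_last1 k cur v hk1 hklen hpref
      have hchain'' : pvChainB k (pvLastK k (cur ++ pvLast1 v)) rest = true := by
        rw [pvLastK_append1 k cur (pvLast1 v) hk1 hklen hlast1]
        exact hchain'
      have hklen' : k ≤ PySem.Str.len (cur ++ pvLast1 v) := by
        rw [pvStrLen, String.toList_append, List.length_append, hlast1]
        rw [pvStrLen] at hklen
        push_cast
        omega
      rw [ih _ _ hnd' hpnd' hperm' hchain'' hklen']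
      rfl


-- A's loop when k ≤ 0 and every value is short: both compared slices are '' at every step,
-- so the first key always matches and the values' last characters are appended in dict order
lemma pvALoop_konly (k : Int) (hk : k ≤ 0) :
    ∀ (l : List (String × String)) (circ : String),
      (l.map Prod.fst).Nodup →
      (∀ p ∈ l, k = 0 ∨ PySem.Str.len p.2 ≤ -k) →
      pvALoop k circ ⟨l⟩ = pvLasts circ (l.map Prod.snd) := by
  intro l
  induction l with
  | nil =>
      intro circ _ _
      rw [pvALoop.eq_def]
      simp [PySem.Dict.keys, pvLasts]
  | cons p rest ih =>
      intro circ hnd hall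
      have hget : (PySem.Dict.mk (p :: rest) : PySem.Dict String String).getD p.1 "" = p.2 :=
        pvGetD_cons_self p rest
      have hpred :
          (pvLastK k circ == pvPrefK k ((PySem.Dict.mk (p :: rest) : PySem.Dict String String).getD p.1 "")) = true := by
        rw [hget, pvSuffix_empty k hk, pvPrefix_empty k hk p.2 (hall p (by simp))]
        rfl
      have hkeys : (PySem.Dict.mk (p :: rest) : PySem.Dict String String).keys
          = p.1 :: rest.map Prod.fst := by
        simp [PySem.Dict.keys]
      have hfind :
          ((PySem.Dict.mk (p :: rest) : PySem.Dict String String).keys.find? (fun key =>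
            pvLastK k circ ==
            pvPrefK k ((PySem.Dict.mk (p :: rest) : PySem.Dict String String).getD key "")))
          = some p.1 := by
        rw [hkeys]
        exact List.find?_cons_of_pos hpred
      have hnd' : (p.1 :: rest.map Prod.fst).Nodup := by simpa using hnd
      have hnotin : p.1 ∉ rest.map Prod.fst := (List.nodup_cons.1 hnd').1
      have herase : (PySem.Dict.mk (p :: rest) : PySem.Dict String String).erase p.1
          = PySem.Dict.mk rest := by
        simp only [PySem.Dict.erase, List.filter_cons]
        have hpp : (!(p.1 == p.1)) = false := by simp
        rw [hpp]
        simp only [Bool.false_eq_true, if_false]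
        congr 1
        apply List.filter_eq_self.2
        intro q hq
        have hne : q.1 ≠ p.1 := by
          intro hcontra
          exact hnotin (List.mem_map.2 ⟨q, hq, hcontra⟩)
        simp [hne]
      rw [pvALoop.eq_def]
      simp only [hfind, Option.isSome_some, dite_true, Option.get_some, hget, herase]
      rw [ih (circ ++ pvLast1 p.2)
          ((List.nodup_cons.1 hnd').2)
          (fun q hq => hall q (List.mem_cons_of_mem _ hq))]
      rfl

-- the initial heads dict reads 0 at every key
lemma pvHeads_zero (keys : List String) :
    ∀ (h : PySem.Dict String Int), (∀ key, h.getD key 0 = 0) →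
      ∀ key, (keys.foldl (fun h key => h.insert key 0) h).getD key 0 = 0 := by
  induction keys with
  | nil => intro h hh key; exact hh key
  | cons a rest ih =>
      intro h hh key
      simp only [List.foldl_cons]
      refine ih _ ?_ key
      intro key'
      rw [PySem.Dict.getD_insert]
      by_cases hk : key' = a
      · simp [hk]
      · rw [if_neg hk]
        exact hh key'

-- the bucket of t holds exactly the values whose k-prefix is t, in insertion order
lemma pvBuckets_getD (k : Int) (seqs : List (String × String)) (t : String) :
    ((seqs.foldl (fun b p => b.modify (pvPrefK k p.2) [] (· ++ [p.2]))
        (⟨[]⟩ : PySem.Dict String (List String))).getD t [])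
    = (seqs.filter (fun p => pvPrefK k p.2 == t)).map Prod.snd := by
  have h1 : seqs.foldl (fun b p => b.modify (pvPrefK k p.2) [] (· ++ [p.2]))
        (⟨[]⟩ : PySem.Dict String (List String))
      = (seqs.map (fun p => (pvPrefK k p.2, p.2))).foldl
          (fun b q => b.modify q.1 [] (· ++ [q.2])) ⟨[]⟩ := by
    rw [List.foldl_map]
  rw [h1, PySem.Dict.getD_foldl_modify_append]
  simp only [PySem.Dict.getD, PySem.Dict.get?, List.filter_map, List.map_map]
  rfl

lemma pvGet?_some (d : PySem.Dict String (List String)) (t : String) (xs : List String)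
    (h : d.getD t [] = xs) (hne : xs ≠ []) : d.get? t = some xs := by
  cases hc : d.get? t with
  | none =>
      exfalso
      apply hne
      rw [← h]
      simp [PySem.Dict.getD, hc]
  | some ys =>
      have : ys = xs := by
        rw [← h]
        simp [PySem.Dict.getD, hc]
      rw [this]

-- distinct k-prefixes make every bucket a singleton
lemma pvFilter_singleton (k : Int) :
    ∀ (entries : List (String × String)) (v : String),
      (entries.map (fun p => pvPrefK k p.2)).Nodup →
      v ∈ entries.map Prod.snd →
      (entries.filter (fun p => pvPrefK k p.2 == pvPrefK k v)).map Prod.snd = [v] := by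
  intro entries
  induction entries with
  | nil => intro v _ hmem; cases hmem
  | cons e es ih =>
      intro v hpnd hmem
      rcases List.mem_cons.1 hmem with heq | htail
      · subst heq
        have hhead : (pvPrefK k e.2 == pvPrefK k e.2) = true := by simp
        rw [List.filter_cons, hhead]
        simp only [if_true, List.map_cons]
        have hnil : es.filter (fun p => pvPrefK k p.2 == pvPrefK k e.2) = [] := by
          apply List.filter_eq_nil_iff.2
          intro p hp
          simp only [beq_iff_eq]
          intro hcontra
          have : pvPrefK k e.2 ∈ es.map (fun p => pvPrefK k p.2) :=
            List.mem_map.2 ⟨p, hp, hcontra⟩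
          exact (List.nodup_cons.1 hpnd).1 this
        rw [hnil]
        rfl
      · obtain ⟨q, hqmem, hqv⟩ := List.mem_map.1 htail
        have hhead : (pvPrefK k e.2 == pvPrefK k v) = false := by
          simp only [beq_eq_false_iff_ne, ne_eq]
          intro hcontra
          have : pvPrefK k e.2 ∈ es.map (fun p => pvPrefK k p.2) := by
            rw [hcontra, ← hqv]
            exact List.mem_map.2 ⟨q, hqmem, rfl⟩
          exact (List.nodup_cons.1 hpnd).1 this
        rw [List.filter_cons, hhead]
        simp only [Bool.false_eq_true, if_false]
        exact ih v (List.nodup_cons.1 hpnd).2 htail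

-- B's loop follows the chain: the bucket of the current k-suffix is the chain's next value
lemma pvBLoop_chain (k : Int) (hk1 : 1 ≤ k) (buckets : PySem.Dict String (List String)) :
    ∀ (l : List String) (cur : String) (heads : PySem.Dict String Int),
      pvChainB k (pvLastK k cur) l = true →
      (∀ v ∈ l, buckets.get? (pvPrefK k v) = some [v]) →
      (∀ v ∈ l, heads.getD (pvPrefK k v) 0 = 0) →
      (l.map (fun v => pvPrefK k v)).Nodup →
      k ≤ PySem.Str.len cur →
      pvBLoop k buckets l.length cur heads = pvLasts cur l := by
  intro l
  induction l with
  | nil => intro cur heads _ _ _ _ _; rfl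
  | cons v rest ih =>
      intro cur heads hchain hbuck hheads hpnd hklen
      obtain ⟨hpref, hchain'⟩ := pvChain_cons k _ v rest hchain
      have hbv : buckets.get? (pvPrefK k v) = some [v] := hbuck v (by simp)
      have hh0 : heads.getD (pvPrefK k v) 0 = 0 := hheads v (by simp)
      simp only [List.length_cons, pvBLoop]
      rw [← hpref, hbv]
      simp only [hh0]
      rw [if_neg (by norm_num)]
      have hget0 : (PySem.List.pyGet? [v] (0 : Int)).getD "" = v := rfl
      rw [hget0]
      have hlast1 : (pvLast1 v).toList.length = 1 :=
        pvChain_val_last1 k cur v hk1 hklen hpref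
      have hchain'' : pvChainB k (pvLastK k (cur ++ pvLast1 v)) rest = true := by
        rw [pvLastK_append1 k cur (pvLast1 v) hk1 hklen hlast1]
        exact hchain'
      have hklen' : k ≤ PySem.Str.len (cur ++ pvLast1 v) := by
        rw [pvStrLen, String.toList_append, List.length_append, hlast1]
        rw [pvStrLen] at hklen
        push_cast
        omega
      have hheads' : ∀ w ∈ rest,
          (heads.insert (pvPrefK k v) (0 + 1)).getD (pvPrefK k w) 0 = 0 := by
        intro w hw
        rw [PySem.Dict.getD_insert]
        have hne : pvPrefK k w ≠ pvPrefK k v := by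
          intro hcontra
          have : pvPrefK k v ∈ rest.map (fun u => pvPrefK k u) :=
            List.mem_map.2 ⟨w, hw, hcontra⟩
          exact (List.nodup_cons.1 hpnd).1 this
        rw [if_neg hne]
        exact hheads w (List.mem_cons_of_mem _ hw)
      rw [ih (cur ++ pvLast1 v) _ hchain''
        (fun w hw => hbuck w (List.mem_cons_of_mem _ hw)) hheads'
        (List.nodup_cons.1 hpnd).2 hklen']
      rfl

-- B's loop when every suffix lookup lands in the '' bucket: it pops the values in order
lemma pvBLoop_konly (k : Int) (hk : k ≤ 0) (buckets : PySem.Dict String (List String))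
    (vals : List String) (hb : buckets.get? "" = some vals) :
    ∀ (n i : Nat), i + n = vals.length → ∀ (cur : String) (heads : PySem.Dict String Int),
      heads.getD "" 0 = (i : Int) →
      pvBLoop k buckets n cur heads = pvLasts cur (vals.drop i) := by
  intro n
  induction n with
  | zero =>
      intro i hlen cur heads _
      have : i = vals.length := by omega
      rw [this, List.drop_length]
      rfl
  | succ m ih =>
      intro i hlen cur heads hheads
      have hi : i < vals.length := by omega
      simp only [pvBLoop]
      rw [pvSuffix_empty k hk cur, hb]
      simp only [hheads]
      rw [if_neg (by omega)]
      rw [PySem.List.pyGet?_natCast, List.getElem?_eq_getElem hi]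
      simp only [Option.getD_some]
      have hheads' : (heads.insert "" ((i : Int) + 1)).getD "" 0 = ((i + 1 : Nat) : Int) := by
        rw [PySem.Dict.getD_insert, if_pos rfl]
        push_cast
        omega
      rw [ih (i + 1) (by omega) _ _ hheads']
      rw [List.drop_eq_getElem_cons hi]
      rfl

theorem pv_main (circular_seq : String) (sequences : List (String × String)) (k : Int)
    (hpre : Pre_get_circular_seq circular_seq sequences k) :
    get_circular_seq circular_seq sequences k = get_circular_seq_alt circular_seq sequences k := by
  obtain ⟨hnd, hcase⟩ := hpre
  by_cases hs0 : sequences = []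
  · subst hs0
    rw [get_circular_seq, get_circular_seq_alt, pvALoop.eq_def]
    simp [PySem.Dict.keys, pvBLoop]
  rcases hcase with hnil | ⟨hk, hall⟩ | ⟨hk1, hkc, hpnd, hany⟩
  · exact absurd hnil hs0
  · -- k ≤ 0 and every value short: both sides append all last characters in dict order
    have hA : pvALoop k circular_seq ⟨sequences⟩
        = pvLasts circular_seq (sequences.map Prod.snd) :=
      pvALoop_konly k hk sequences circular_seq hnd hall
    have hfilt : sequences.filter (fun p => pvPrefK k p.2 == ("" : String)) = sequences := by
      apply List.filter_eq_self.2
      intro p hp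
      rw [pvPrefix_empty k hk p.2 (hall p hp)]
      rfl
    have hbget : ((sequences.foldl (fun b p => b.modify (pvPrefK k p.2) [] (· ++ [p.2]))
        (⟨[]⟩ : PySem.Dict String (List String))).getD "" [])
        = sequences.map Prod.snd := by
      rw [pvBuckets_getD, hfilt]
    have hvnil : sequences.map Prod.snd ≠ [] := by
      simpa using hs0
    have hbsome := pvGet?_some _ "" _ hbget hvnil
    have hheads := pvHeads_zero
      ((sequences.foldl (fun b p => b.modify (pvPrefK k p.2) [] (· ++ [p.2]))
        (⟨[]⟩ : PySem.Dict String (List String))).keys)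
      ⟨[]⟩ (fun key => by simp [PySem.Dict.getD, PySem.Dict.get?])
    have hB := pvBLoop_konly k hk _ _ hbsome sequences.length 0
      (by simp) circular_seq _ (by simpa using hheads "")
    simp only [List.drop_zero] at hB
    rw [get_circular_seq, get_circular_seq_alt, hA, hB]
  · -- the chain branch: both sides follow the unique chain ordering
    obtain ⟨l, hlmem, hchain⟩ := List.any_eq_true.1 hany
    have hperm : l.Perm (sequences.map Prod.snd) := List.mem_permutations.1 hlmem
    have hA : pvALoop k circular_seq ⟨sequences⟩ = pvLasts circular_seq l :=
      pvALoop_chain k hk1 l sequences circular_seq hnd hpnd hperm.symm hchain hkc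
    have hpnd' : (l.map (fun v => pvPrefK k v)).Nodup := by
      have h1 : ((sequences.map Prod.snd).map (fun v => pvPrefK k v)).Nodup := by
        rw [List.map_map]
        exact hpnd
      exact h1.perm ((hperm.map _).symm)
    have hbuck : ∀ v ∈ l, ((sequences.foldl
        (fun b p => b.modify (pvPrefK k p.2) [] (· ++ [p.2]))
        (⟨[]⟩ : PySem.Dict String (List String))).get? (pvPrefK k v)) = some [v] := by
      intro v hv
      have hvmem : v ∈ sequences.map Prod.snd := hperm.mem_iff.1 hv
      apply pvGet?_some
      · rw [pvBuckets_getD]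
        exact pvFilter_singleton k sequences v hpnd hvmem
      · simp
    have hheads := pvHeads_zero
      ((sequences.foldl (fun b p => b.modify (pvPrefK k p.2) [] (· ++ [p.2]))
        (⟨[]⟩ : PySem.Dict String (List String))).keys)
      ⟨[]⟩ (fun key => by simp [PySem.Dict.getD, PySem.Dict.get?])
    have hlen : sequences.length = l.length := by
      rw [hperm.length_eq]
      simp
    have hB := pvBLoop_chain k hk1 _ l circular_seq _ hchain hbuck
      (fun v _ => hheads (pvPrefK k v)) hpnd' hkc
    rw [get_circular_seq, get_circular_seq_alt, hA, hlen, hB]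

-- ===== VERDICT (by name: the statement is the Claim_ definition above) =====
theorem get_circular_seq_spec : Claim_equal_get_circular_seq := by
  intro circular_seq sequences k _ hpre
  unfold Spec_get_circular_seq
  exact pv_main circular_seq sequences k hpre
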